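-- pv_equiv track=rewrite | github.com/double-thinker/202405009_tallerpydata | tools/security.py | ascii_to_tag_space
-- ===== SOURCE A (Python) =====
-- def ascii_to_tag_space(text):
--     tag_space_chars = []
--     for char in text:
--         if ord(char) >= 32 and ord(char) <= 126:
--             tag_space_char = chr(ord(char) + 917504)
--             tag_space_chars.append(tag_space_char)
--         else:
--             tag_space_chars.append(char)
--     return "".join(tag_space_chars)
-- ===== SOURCE B (Python) =====
-- def _shift1(s):
--     # shift a single-character string into the Unicode tag-space block if printable ASCII
--     o = ord(s)
--     return chr(o + 917504) if 32 <= o <= 126 else s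
--
-- def ascii_to_tag_space(text):
--     # divide and conquer: split the string in half, convert each half, concatenate
--     n = len(text)
--     if n == 0:
--         return ""
--     if n == 1:
--         return _shift1(text)
--     mid = n // 2
--     return ascii_to_tag_space(text[:mid]) + ascii_to_tag_space(text[mid:])
-- ===== Notes on version B (the rewrite author's own statement) =====
-- stated objective: alternative
-- what changed: Replaced the linear per-character append loop by a divide-and-conquer recursion that halves the string, recursively converts each half, and concatenates, with single-character strings as base cases.
import Mathlib
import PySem

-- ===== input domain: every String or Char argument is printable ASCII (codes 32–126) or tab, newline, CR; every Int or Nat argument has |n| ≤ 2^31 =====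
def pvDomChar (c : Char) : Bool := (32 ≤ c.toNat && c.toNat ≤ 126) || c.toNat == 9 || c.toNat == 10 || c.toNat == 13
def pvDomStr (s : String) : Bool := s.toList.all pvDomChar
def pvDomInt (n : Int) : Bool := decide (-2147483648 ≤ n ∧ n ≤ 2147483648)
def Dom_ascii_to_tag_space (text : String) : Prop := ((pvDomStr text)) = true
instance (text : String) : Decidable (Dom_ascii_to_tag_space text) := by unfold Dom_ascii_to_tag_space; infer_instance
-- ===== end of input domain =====

-- B replaces A's linear per-character append loop by a divide-and-conquer recursion
-- (halve, convert each half, concatenate); objective: alternative.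

-- ===== PORT A =====
-- literal port: loop over chars, append shifted or unchanged char, join at the end
def ascii_to_tag_space (text : String) : String :=
  let tag_space_chars := text.toList.foldl (fun acc char =>
    if 32 ≤ char.toNat ∧ char.toNat ≤ 126 then
      acc ++ [Char.ofNat (char.toNat + 917504)]
    else
      acc ++ [char]) []
  String.ofList tag_space_chars

-- ===== PORT B =====
-- _shift1: shift a single character into the tag-space block if printable ASCII
def pvShift1 (c : Char) : Char :=
  if 32 ≤ c.toNat ∧ c.toNat ≤ 126 then Char.ofNat (c.toNat + 917504) else c

-- divide and conquer on the string: base cases length 0 and 1, otherwise split at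
-- n // 2 (text[:mid] / text[mid:] are take/drop for these in-range nonnegative bounds)
def ascii_to_tag_space_alt (text : String) : String :=
  match h : text.toList with
  | [] => ""
  | [c] => String.ofList [pvShift1 c]
  | c1 :: c2 :: rest =>
    let n := (c1 :: c2 :: rest).length
    let mid := n / 2
    ascii_to_tag_space_alt (String.ofList ((c1 :: c2 :: rest).take mid)) ++
      ascii_to_tag_space_alt (String.ofList ((c1 :: c2 :: rest).drop mid))
termination_by text.toList.length
decreasing_by
  · simp [h]; omega
  · simp [h]; omega

-- ===== PRECONDITION & SPEC =====
def Spec_ascii_to_tag_space (text : String) (out : String) : Prop := out = ascii_to_tag_space_alt text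
instance (text : String) (out : String) : Decidable (Spec_ascii_to_tag_space text out) := by unfold Spec_ascii_to_tag_space; infer_instance

-- ===== CLAIM =====
def Claim_equal_ascii_to_tag_space : Prop := ∀ (text : String), Dom_ascii_to_tag_space text → Spec_ascii_to_tag_space text (ascii_to_tag_space text)

-- ===== LEMMAS AND PROOFS =====

-- B computes the per-character map, by strong induction on the length
theorem alt_mk_aux (n : Nat) : ∀ l : List Char, l.length ≤ n →
    ascii_to_tag_space_alt (String.ofList l) = String.ofList (l.map pvShift1) := by
  induction n with
  | zero =>
    intro l hl
    have : l = [] := List.eq_nil_of_length_eq_zero (Nat.le_zero.mp hl)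
    subst this
    rw [ascii_to_tag_space_alt]
    simp
  | succ n ih =>
    intro l hl
    match l with
    | [] => rw [ascii_to_tag_space_alt]; simp
    | [c] =>
      rw [ascii_to_tag_space_alt]
      split
      · next heq => simp at heq
      · next c' heq =>
        rw [String.toList_ofList] at heq
        rw [List.cons.injEq] at heq
        rw [heq.1]
        simp
      · next d1 d2 drest heq => simp at heq
    | c1 :: c2 :: rest =>
      rw [ascii_to_tag_space_alt]
      split
      · next heq => simp at heq
      · next c' heq => simp at heq
      · next d1 d2 drest heq =>
        rw [String.toList_ofList] at heq
        rw [← heq]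
        show ascii_to_tag_space_alt (String.ofList ((c1 :: c2 :: rest).take ((c1 :: c2 :: rest).length / 2))) ++
              ascii_to_tag_space_alt (String.ofList ((c1 :: c2 :: rest).drop ((c1 :: c2 :: rest).length / 2)))
            = String.ofList ((c1 :: c2 :: rest).map pvShift1)
        have h1 : ((c1 :: c2 :: rest).take ((c1 :: c2 :: rest).length / 2)).length ≤ n := by
          simp only [List.length_take]; simp at hl ⊢; omega
        have h2 : ((c1 :: c2 :: rest).drop ((c1 :: c2 :: rest).length / 2)).length ≤ n := by
          simp only [List.length_drop]; simp at hl ⊢; omega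
        rw [ih _ h1, ih _ h2, ← String.ofList_append, ← List.map_append, List.take_append_drop]

theorem alt_eq_map (text : String) :
    ascii_to_tag_space_alt text = String.ofList (text.toList.map pvShift1) := by
  have := alt_mk_aux text.toList.length text.toList le_rfl
  rwa [String.ofList_toList] at this

-- A's append-fold is the same map
theorem foldl_append_step (l : List Char) (acc : List Char) :
    (l.foldl (fun acc char =>
        if 32 ≤ char.toNat ∧ char.toNat ≤ 126 then
          acc ++ [Char.ofNat (char.toNat + 917504)]
        else
          acc ++ [char]) acc)
      = acc ++ l.map pvShift1 := by
  induction l generalizing acc with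
  | nil => simp
  | cons c rest ih =>
    simp only [List.foldl_cons, List.map_cons, ih, pvShift1]
    by_cases h : 32 ≤ c.toNat ∧ c.toNat ≤ 126 <;> simp [h]

-- ===== VERDICT =====
theorem ascii_to_tag_space_spec : Claim_equal_ascii_to_tag_space := by
  intro text _
  unfold Spec_ascii_to_tag_space ascii_to_tag_space
  rw [foldl_append_step, List.nil_append, alt_eq_map]
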